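-- pv_equiv track=rewrite | github.com/jasonhklee0408/Machine-Learning-Applications | lab01.py | same_diff_ints
-- ===== SOURCE A (Python) =====
-- def same_diff_ints(ints):
--     """
--     same_diff_ints tests whether a list contains
--     two list elements i places apart, whose distance
--     as integers is also i.
--     :param ints: a list of integers
--     :returns: a boolean value if ints contains two
--     elements as described above.
--     :Example:
--     >>> same_diff_ints([5,3,1,5,9,8])
--     True
--     >>> same_diff_ints([1,3,5,7,9])
--     False
--     """
--     for i in range(len(ints)):
--         for j in range(i+1,len(ints)):
--             difference = abs(ints[i]-ints[j])
--             distance = abs(i-j)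
--             if difference == distance:
--                 return True
--
--     return False
-- ===== SOURCE B (Python) =====
-- def same_diff_ints(ints):
--     plus = set()
--     minus = set()
--     for i, v in enumerate(ints):
--         if v + i in plus or v - i in minus:
--             return True
--         plus.add(v + i)
--         minus.add(v - i)
--     return False
-- ===== Notes on version B (the rewrite author's own statement) =====
-- stated objective: faster
-- what changed: Replaced the O(n^2) all-pairs scan comparing |a_i-a_j| with |i-j| by a single pass that detects a collision of a_i+i or a_i-i in two hash sets (|a_i-a_j|=j-i iff the two indices share a value of v+idx or v-idx).
import Mathlib
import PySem

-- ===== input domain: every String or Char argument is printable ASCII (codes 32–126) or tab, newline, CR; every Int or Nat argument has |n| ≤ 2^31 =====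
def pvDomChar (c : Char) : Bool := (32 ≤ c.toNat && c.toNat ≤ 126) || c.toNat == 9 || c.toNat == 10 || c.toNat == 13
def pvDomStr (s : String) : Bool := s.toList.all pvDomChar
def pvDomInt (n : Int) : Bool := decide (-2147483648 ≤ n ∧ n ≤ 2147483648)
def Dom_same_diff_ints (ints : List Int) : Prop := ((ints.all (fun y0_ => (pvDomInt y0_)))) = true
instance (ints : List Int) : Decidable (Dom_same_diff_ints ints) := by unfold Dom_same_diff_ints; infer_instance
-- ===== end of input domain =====

-- B replaces A's O(n^2) all-pairs |a_i-a_j| = |i-j| scan with one pass collecting a_i+i and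
-- a_i-i in two sets and reporting a collision (faster: asymptotic in a timing run's label).

-- ===== PORT A =====
-- nested loops with early return, ported as short-circuiting `any`; indices produced by
-- pyRange are always in range, so pyGetD's default 0 is never used
def same_diff_ints (ints : List Int) : Bool :=
  (PySem.List.pyRange 0 (PySem.List.len ints) 1).any (fun i =>
    (PySem.List.pyRange (i + 1) (PySem.List.len ints) 1).any (fun j =>
      |PySem.List.pyGetD ints i 0 - PySem.List.pyGetD ints j 0| == |i - j|))

-- ===== PORT B =====
-- the loop of Source B: index counter i, the two sets `plus` and `minus`, early return on a hit
def sdiGo : List Int → Int → PySem.Set Int → PySem.Set Int → Bool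
  | [], _, _, _ => false
  | v :: rest, i, plus, minus =>
    if PySem.Set.contains plus (v + i) || PySem.Set.contains minus (v - i) then true
    else sdiGo rest (i + 1) (PySem.Set.add plus (v + i)) (PySem.Set.add minus (v - i))

def same_diff_ints_alt (ints : List Int) : Bool :=
  sdiGo ints 0 PySem.Set.empty PySem.Set.empty

-- ===== PRECONDITION & SPEC =====
def Spec_same_diff_ints (ints : List Int) (out : Bool) : Prop := out = same_diff_ints_alt ints
instance (ints : List Int) (out : Bool) : Decidable (Spec_same_diff_ints ints out) := by unfold Spec_same_diff_ints; infer_instance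

-- ===== CLAIM (what is proved, stated in full; the proofs are below) =====
def Claim_equal_same_diff_ints : Prop := ∀ (ints : List Int), Dom_same_diff_ints ints → Spec_same_diff_ints ints (same_diff_ints ints)

-- ===== LEMMAS AND PROOFS =====

-- the common characterisation: two positions m < k with a_m+m = a_k+k or a_m-m = a_k-k
def pvCollide (ints : List Int) : Prop :=
  ∃ k, ∃ _ : k < ints.length, ∃ m, ∃ _ : m < k,
    (ints[m] + (m : Int) = ints[k] + (k : Int) ∨ ints[m] - (m : Int) = ints[k] - (k : Int))

lemma sdiGo_iff (rest : List Int) (i : Int) (plus minus : PySem.Set Int) :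
    sdiGo rest i plus minus = true ↔
      ∃ k, ∃ _ : k < rest.length,
        ((rest[k] + (i + (k : Int)) ∈ plus) ∨ (rest[k] - (i + (k : Int)) ∈ minus) ∨
          ∃ m, ∃ _ : m < k,
            (rest[m] + (i + (m : Int)) = rest[k] + (i + (k : Int)) ∨
             rest[m] - (i + (m : Int)) = rest[k] - (i + (k : Int)))) := by
  induction rest generalizing i plus minus with
  | nil => simp [sdiGo]
  | cons v r ih =>
    by_cases h : v + i ∈ plus ∨ v - i ∈ minus
    · constructor
      · intro _
        exact ⟨0, Nat.succ_pos _, by simpa using h⟩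
      · intro _
        simp only [sdiGo]
        rw [if_pos]
        simp only [Bool.or_eq_true, PySem.Set.contains_iff]
        exact h
    · have hstep : sdiGo (v :: r) i plus minus
          = sdiGo r (i + 1) (PySem.Set.add plus (v + i)) (PySem.Set.add minus (v - i)) := by
        simp only [sdiGo]
        rw [if_neg]
        intro hcond
        exact h (by simpa [PySem.Set.contains_iff] using hcond)
      rw [hstep, ih]
      constructor
      · rintro ⟨k, hk, hcase⟩
        refine ⟨k + 1, Nat.succ_lt_succ hk, ?_⟩
        have harith : i + 1 + (k : Int) = i + ((k : Nat) + 1 : Nat) := by push_cast; ring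
        rcases hcase with hp | hm | ⟨m, hmk, heq⟩
        · rw [PySem.Set.mem_add] at hp
          rcases hp with hp | hp
          · exact Or.inl (by simpa [harith] using hp)
          · refine Or.inr (Or.inr ⟨0, Nat.succ_pos _, Or.inl ?_⟩)
            simp only [List.getElem_cons_zero, List.getElem_cons_succ]
            push_cast
            linarith [hp]
        · rw [PySem.Set.mem_add] at hm
          rcases hm with hm | hm
          · exact Or.inr (Or.inl (by simpa [harith] using hm))
          · refine Or.inr (Or.inr ⟨0, Nat.succ_pos _, Or.inr ?_⟩)
            simp only [List.getElem_cons_zero, List.getElem_cons_succ]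
            push_cast
            linarith [hm]
        · refine Or.inr (Or.inr ⟨m + 1, Nat.succ_lt_succ hmk, ?_⟩)
          simp only [List.getElem_cons_succ]
          rcases heq with he | he
          · exact Or.inl (by push_cast; linarith [he])
          · exact Or.inr (by push_cast; linarith [he])
      · rintro ⟨k, hk, hcase⟩
        match k with
        | 0 =>
          exfalso
          rcases hcase with hp | hm | ⟨m, hmk, _⟩
          · exact h (Or.inl (by simpa using hp))
          · exact h (Or.inr (by simpa using hm))
          · exact absurd hmk (Nat.not_lt_zero m)
        | k' + 1 =>
          have hk' : k' < r.length := Nat.lt_of_succ_lt_succ hk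
          refine ⟨k', hk', ?_⟩
          rcases hcase with hp | hm | ⟨m, hmk, heq⟩
          · refine Or.inl ?_
            rw [PySem.Set.mem_add]
            refine Or.inl ?_
            simp only [List.getElem_cons_succ] at hp
            have : i + ((k' : Nat) + 1 : Nat) = i + 1 + (k' : Int) := by push_cast; ring
            rwa [this] at hp
          · refine Or.inr (Or.inl ?_)
            rw [PySem.Set.mem_add]
            refine Or.inl ?_
            simp only [List.getElem_cons_succ] at hm
            have : i + ((k' : Nat) + 1 : Nat) = i + 1 + (k' : Int) := by push_cast; ring
            rwa [this] at hm
          · match m with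
            | 0 =>
              simp only [List.getElem_cons_zero, List.getElem_cons_succ] at heq
              rcases heq with he | he
              · refine Or.inl ?_
                rw [PySem.Set.mem_add]
                refine Or.inr ?_
                push_cast at he ⊢
                linarith [he]
              · refine Or.inr (Or.inl ?_)
                rw [PySem.Set.mem_add]
                refine Or.inr ?_
                push_cast at he ⊢
                linarith [he]
            | m' + 1 =>
              have hm' : m' < k' := Nat.lt_of_succ_lt_succ hmk
              refine Or.inr (Or.inr ⟨m', hm', ?_⟩)
              simp only [List.getElem_cons_succ] at heq
              rcases heq with he | he
              · exact Or.inl (by push_cast at he ⊢; linarith [he])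
              · exact Or.inr (by push_cast at he ⊢; linarith [he])

lemma alt_iff (ints : List Int) : same_diff_ints_alt ints = true ↔ pvCollide ints := by
  rw [same_diff_ints_alt, sdiGo_iff]
  unfold pvCollide
  constructor
  · rintro ⟨k, hk, hcase⟩
    rcases hcase with hp | hm | ⟨m, hmk, heq⟩
    · exact absurd hp (by simp [PySem.Set.empty])
    · exact absurd hm (by simp [PySem.Set.empty])
    · refine ⟨k, hk, m, hmk, ?_⟩
      simpa using heq
  · rintro ⟨k, hk, m, hmk, heq⟩
    exact ⟨k, hk, Or.inr (Or.inr ⟨m, hmk, by simpa using heq⟩)⟩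

lemma a_iff (ints : List Int) : same_diff_ints ints = true ↔ pvCollide ints := by
  unfold same_diff_ints pvCollide
  simp only [List.any_eq_true, PySem.List.mem_pyRange_one, beq_iff_eq, PySem.List.len_eq]
  constructor
  · rintro ⟨i, ⟨hi0, hin⟩, j, ⟨hij, hjn⟩, habs⟩
    have hj0 : (0 : Int) ≤ j := by omega
    have hmi : i = ((i.toNat : Int)) := (Int.toNat_of_nonneg hi0).symm
    have hmj : j = ((j.toNat : Int)) := (Int.toNat_of_nonneg hj0).symm
    have hkn : j.toNat < ints.length := by omega
    have hmk : i.toNat < j.toNat := by omega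
    refine ⟨j.toNat, hkn, i.toNat, hmk, ?_⟩
    rw [hmi, hmj, PySem.List.pyGetD_natCast, PySem.List.pyGetD_natCast,
        List.getD_eq_getElem _ _ (by omega : i.toNat < ints.length),
        List.getD_eq_getElem _ _ (by omega : j.toNat < ints.length)] at habs
    rcases abs_cases (ints[i.toNat] - ints[j.toNat]) with ⟨h1, _⟩ | ⟨h1, _⟩ <;>
      rcases abs_cases ((i.toNat : Int) - (j.toNat : Int)) with ⟨h2, _⟩ | ⟨h2, _⟩ <;>
      rw [h1, h2] at habs <;> omega
  · rintro ⟨k, hk, m, hmk, heq⟩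
    refine ⟨(m : Int), ⟨by omega, by omega⟩, (k : Int), ⟨by omega, by omega⟩, ?_⟩
    have hgi : PySem.List.pyGetD ints (m : Int) 0 = ints[m] := by
      rw [PySem.List.pyGetD_natCast]
      exact List.getD_eq_getElem _ _ (by omega)
    have hgj : PySem.List.pyGetD ints (k : Int) 0 = ints[k] := by
      rw [PySem.List.pyGetD_natCast]
      exact List.getD_eq_getElem _ _ (by omega)
    rw [hgi, hgj]
    rcases abs_cases (ints[m] - ints[k]) with ⟨h1, _⟩ | ⟨h1, _⟩ <;>
      rcases abs_cases ((m : Int) - (k : Int)) with ⟨h2, _⟩ | ⟨h2, _⟩ <;>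
      rw [h1, h2] <;> omega

-- ===== VERDICT (by name: the statement is the Claim_ definition above) =====
theorem same_diff_ints_spec : Claim_equal_same_diff_ints := by
  intro ints _
  unfold Spec_same_diff_ints
  rw [Bool.eq_iff_iff, a_iff, alt_iff]
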